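-- pv_equiv track=rewrite | github.com/alinik24/job_predator | applications/form_ai.py | _find_best_option
-- ===== SOURCE A (Python) =====
-- from typing import Dict, List, Optional, Tuple
--
-- def _find_best_option(answer: str, options: List[str]) -> Optional[str]:
--     """Find the best matching option for a given answer string."""
--     if not answer or not options:
--         return None
--
--     answer_lower = answer.lower().strip()
--
--     # Exact match
--     for opt in options:
--         if opt.lower().strip() == answer_lower:
--             return opt
--
--     # Partial match
--     for opt in options:
--         if answer_lower in opt.lower() or opt.lower() in answer_lower:
--             return opt
--
--     # Skip placeholder options
--     meaningful = [o for o in options if o.lower() not in ("", "select...", "bitte wählen", "--")]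
--     if len(meaningful) == 1:
--         return meaningful[0]
--
--     return None
-- ===== SOURCE B (Python) =====
-- from typing import List, Optional
--
-- def _find_best_option(answer: str, options: List[str]) -> Optional[str]:
--     """Single pass: return immediately on exact match, remember the first partial match."""
--     if not answer or not options:
--         return None
--     answer_lower = answer.lower().strip()
--     first_partial = None
--     for opt in options:
--         opt_lower = opt.lower()
--         if opt_lower.strip() == answer_lower:
--             return opt
--         if first_partial is None and (answer_lower in opt_lower or opt_lower in answer_lower):
--             first_partial = opt
--     if first_partial is not None:
--         return first_partial
--     meaningful = [o for o in options if o.lower() not in ("", "select...", "bitte wählen", "--")]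
--     if len(meaningful) == 1:
--         return meaningful[0]
--     return None
-- ===== Notes on version B (the rewrite author's own statement) =====
-- stated objective: alternative
-- what changed: Replaced A's two sequential scans (exact-match loop then partial-match loop) by a single pass that returns immediately on an exact match and remembers the first partial match in an accumulator, keeping the placeholder-filter fallback.
import Mathlib
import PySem

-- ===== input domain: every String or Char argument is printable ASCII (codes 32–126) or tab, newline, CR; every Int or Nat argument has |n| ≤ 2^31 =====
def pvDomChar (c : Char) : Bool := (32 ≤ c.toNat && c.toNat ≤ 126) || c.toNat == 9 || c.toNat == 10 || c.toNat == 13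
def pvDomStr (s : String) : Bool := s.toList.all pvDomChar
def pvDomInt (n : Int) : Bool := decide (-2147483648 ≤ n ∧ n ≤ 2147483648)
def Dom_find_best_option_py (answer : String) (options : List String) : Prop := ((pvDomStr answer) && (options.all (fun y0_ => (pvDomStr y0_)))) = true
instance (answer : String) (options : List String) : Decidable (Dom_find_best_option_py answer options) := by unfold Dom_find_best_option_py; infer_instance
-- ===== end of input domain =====

-- B merges A's two scans into one pass with an early return on exact match and a
-- remembered first partial match (objective: alternative decomposition, same cost).


-- ===== PORT A =====
-- A-side predicates
-- opt.lower().strip() == answer_lower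
def pvExactP (al : List Char) (opt : String) : Bool :=
  PySem.Chars.strip (PySem.Chars.lower opt.toList) == al
-- answer_lower in opt.lower() or opt.lower() in answer_lower
def pvPartialP (al : List Char) (opt : String) : Bool :=
  PySem.Chars.isIn al (PySem.Chars.lower opt.toList) || PySem.Chars.isIn (PySem.Chars.lower opt.toList) al
-- o.lower() in ("", "select...", "bitte wählen", "--")
def pvPlaceholder (o : String) : Bool :=
  let l := PySem.Chars.lower o.toList
  l == "".toList || l == "select...".toList || l == "bitte wählen".toList || l == "--".toList

def find_best_option_py (answer : String) (options : List String) : Option String :=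
  if answer = "" ∨ options = [] then none
  else
    let al := PySem.Chars.strip (PySem.Chars.lower answer.toList)
    -- Exact match loop
    match options.find? (pvExactP al) with
    | some o => some o
    | none =>
      -- Partial match loop
      match options.find? (pvPartialP al) with
      | some o => some o
      | none =>
        -- Skip placeholder options
        let meaningful := options.filter (fun o => !pvPlaceholder o)
        match meaningful with
        | [m] => some m
        | _ => none

-- ===== PORT B =====
-- B-side placeholder test: o.lower() in ("", "select...", "bitte wählen", "--")
def pvPlaceholderB (o : String) : Bool :=
  let l := PySem.Chars.lower o.toList
  l == "".toList || l == "select...".toList || l == "bitte wählen".toList || l == "--".toList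

-- the single pass: early return on exact, first_partial accumulator, fp if set at the end
def pvBLoop (al : List Char) : List String → Option String → Option String
  | [], fp => fp
  | opt :: rest, fp =>
    let ol := PySem.Chars.lower opt.toList
    if PySem.Chars.strip ol == al then some opt
    else pvBLoop al rest
      (if fp.isNone && (PySem.Chars.isIn al ol || PySem.Chars.isIn ol al) then some opt else fp)

def find_best_option_py_alt (answer : String) (options : List String) : Option String :=
  if answer = "" ∨ options = [] then none
  else
    let al := PySem.Chars.strip (PySem.Chars.lower answer.toList)
    let r := pvBLoop al options none
    if r.isSome then r
    else
      let meaningful := options.filter (fun o => !pvPlaceholderB o)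
      if meaningful.length = 1 then meaningful.head? else none

-- ===== PRECONDITION & SPEC =====
def Spec_find_best_option_py (answer : String) (options : List String) (out : Option String) : Prop := out = find_best_option_py_alt answer options
instance (answer : String) (options : List String) (out : Option String) : Decidable (Spec_find_best_option_py answer options out) := by unfold Spec_find_best_option_py; infer_instance

-- ===== CLAIM (what is proved, stated in full; the proofs are below) =====
def Claim_equal_find_best_option_py : Prop := ∀ (answer : String) (options : List String), Dom_find_best_option_py answer options → Spec_find_best_option_py answer options (find_best_option_py answer options)

-- ===== LEMMAS AND PROOFS =====

-- the single pass = first exact match, else the accumulator, else first partial match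
theorem pvBLoop_eq (al : List Char) (opts : List String) (fp : Option String) :
    pvBLoop al opts fp =
      match opts.find? (pvExactP al) with
      | some o => some o
      | none => fp.or (opts.find? (pvPartialP al)) := by
  induction opts generalizing fp with
  | nil => simp [pvBLoop]
  | cons opt rest ih =>
    rw [pvBLoop]
    simp only [List.find?]
    by_cases hex : (PySem.Chars.strip (PySem.Chars.lower opt.toList) == al) = true
    · rw [show pvExactP al opt = true from hex, if_pos hex]
    · have he : pvExactP al opt = false := by
        simpa [pvExactP] using hex
      rw [he, if_neg hex, ih]
      cases hfind : List.find? (pvExactP al) rest with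
      | some o => simp
      | none =>
        by_cases hp : (PySem.Chars.isIn al (PySem.Chars.lower opt.toList) ||
            PySem.Chars.isIn (PySem.Chars.lower opt.toList) al) = true
        · rw [show pvPartialP al opt = true from hp, hp]
          cases fp <;> simp
        · have hp' : (PySem.Chars.isIn al (PySem.Chars.lower opt.toList) ||
              PySem.Chars.isIn (PySem.Chars.lower opt.toList) al) = false := by
            simpa using hp
          rw [show pvPartialP al opt = false from hp', hp']
          cases fp <;> simp

-- the two renderings of "if len(meaningful)==1: return meaningful[0]" agree
theorem pvFallback_eq (m : List String) :
    (match m with | [x] => some x | _ => none) =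
      (if m.length = 1 then m.head? else none) := by
  match m with
  | [] => rfl
  | [x] => rfl
  | x :: y :: t => simp [List.length]

-- ===== VERDICT (by name: the statement is the Claim_ definition above) =====
theorem find_best_option_py_spec : Claim_equal_find_best_option_py := by
  intro answer options _
  unfold Spec_find_best_option_py find_best_option_py find_best_option_py_alt
  by_cases h : answer = "" ∨ options = []
  · simp [h]
  · simp only [h, if_false]
    rw [pvBLoop_eq]
    cases options.find? (pvExactP (PySem.Chars.strip (PySem.Chars.lower answer.toList))) with
    | some o => rfl
    | none =>
      cases options.find? (pvPartialP (PySem.Chars.strip (PySem.Chars.lower answer.toList))) with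
      | some o => rfl
      | none =>
        simp only [Option.none_or, Option.isSome_none, if_false, Bool.false_eq_true]
        exact pvFallback_eq _
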